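-- pv_equiv track=rewrite | github.com/frankito-re/UTN | Algoritmos de datos 1er Año/TP5 Franco Reyes/actividad6.py | contar_nombres_con_letra
-- ===== SOURCE A (Python) =====
-- def contar_nombres_con_letra(nombres, letra):
--     if not nombres:
--         return 0
--     else:
--         if nombres[0].startswith(letra):
--             return 1 + contar_nombres_con_letra(nombres[1:], letra)
--         else:
--             return contar_nombres_con_letra(nombres[1:], letra)
-- ===== SOURCE B (Python) =====
-- def contar_nombres_con_letra(nombres, letra):
--     contador = 0
--     for nombre in nombres:
--         if nombre.startswith(letra):
--             contador += 1
--     return contador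
-- ===== Notes on version B (the rewrite author's own statement) =====
-- stated objective: simpler
-- what changed: Replaced the tail recursion with list slicing by a single iterative for-loop with an explicit counter accumulator.
import Mathlib
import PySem

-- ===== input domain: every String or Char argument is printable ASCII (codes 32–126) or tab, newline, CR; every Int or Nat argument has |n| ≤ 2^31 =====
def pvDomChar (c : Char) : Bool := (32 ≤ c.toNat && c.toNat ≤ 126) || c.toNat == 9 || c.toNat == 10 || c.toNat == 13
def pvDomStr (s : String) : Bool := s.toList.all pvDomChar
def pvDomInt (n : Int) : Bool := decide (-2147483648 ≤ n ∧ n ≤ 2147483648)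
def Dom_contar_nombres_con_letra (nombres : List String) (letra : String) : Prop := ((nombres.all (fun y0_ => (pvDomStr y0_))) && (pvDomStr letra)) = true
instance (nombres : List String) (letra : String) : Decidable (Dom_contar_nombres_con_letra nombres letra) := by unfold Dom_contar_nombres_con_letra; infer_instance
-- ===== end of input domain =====

-- B replaces A's slicing tail recursion by one iterative counter loop (simpler, linear).


-- ===== PORT A =====
def contar_nombres_con_letra (nombres : List String) (letra : String) : Int :=
  match nombres with
  | [] => 0
  | n :: rest =>
      if PySem.Str.startswith n letra then 1 + contar_nombres_con_letra rest letra
      else contar_nombres_con_letra rest letra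

-- ===== PORT B =====
def contar_nombres_con_letra_alt (nombres : List String) (letra : String) : Int :=
  nombres.foldl (fun contador nombre => if PySem.Str.startswith nombre letra then contador + 1 else contador) 0

-- ===== PRECONDITION & SPEC =====
def Spec_contar_nombres_con_letra (nombres : List String) (letra : String) (out : Int) : Prop := out = contar_nombres_con_letra_alt nombres letra
instance (nombres : List String) (letra : String) (out : Int) : Decidable (Spec_contar_nombres_con_letra nombres letra out) := by unfold Spec_contar_nombres_con_letra; infer_instance

-- ===== CLAIM (what is proved, stated in full; the proofs are below) =====
def Claim_equal_contar_nombres_con_letra : Prop := ∀ (nombres : List String) (letra : String), Dom_contar_nombres_con_letra nombres letra → Spec_contar_nombres_con_letra nombres letra (contar_nombres_con_letra nombres letra)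

-- ===== LEMMAS AND PROOFS =====
lemma alt_foldl_acc (nombres : List String) (letra : String) (c : Int) :
    nombres.foldl (fun contador nombre => if PySem.Str.startswith nombre letra then contador + 1 else contador) c
      = c + contar_nombres_con_letra_alt nombres letra := by
  induction nombres generalizing c with
  | nil => simp [contar_nombres_con_letra_alt]
  | cons n rest ih =>
      simp only [contar_nombres_con_letra_alt, List.foldl_cons]
      rw [ih, ih]
      split_ifs <;> ring

lemma a_eq_b (nombres : List String) (letra : String) :
    contar_nombres_con_letra nombres letra = contar_nombres_con_letra_alt nombres letra := by
  induction nombres with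
  | nil => simp [contar_nombres_con_letra, contar_nombres_con_letra_alt]
  | cons n rest ih =>
      simp only [contar_nombres_con_letra, contar_nombres_con_letra_alt, List.foldl_cons]
      rw [alt_foldl_acc, ih]
      split_ifs <;> ring

-- ===== VERDICT (by name: the statement is the Claim_ definition above) =====
theorem contar_nombres_con_letra_spec : Claim_equal_contar_nombres_con_letra := by
  intro nombres letra _
  exact a_eq_b nombres letra
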